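-- pv_equiv track=rewrite | github.com/luffy2106/coding-exercises | interview/thales/exercise_2/solution.py | remaining_leaves_chatGPT
-- ===== SOURCE A (Python) =====
-- def remaining_leaves_chatGPT(width: int, height: int, leaves: list, winds: str) -> int:
--     """
--     This is the solution from chatGPT and it's wrong
--     """
--     for wind in winds:
--         if wind == 'U':  # Up
--             for col in range(width):
--                 for row in range(1, height):
--                     leaves[row - 1][col] += leaves[row][col]
--                     leaves[row][col] = 0
--         elif wind == 'D':  # Down
--             for col in range(width):
--                 for row in range(height - 2, -1, -1):
--                     leaves[row + 1][col] += leaves[row][col]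
--                     leaves[row][col] = 0
--         elif wind == 'L':  # Left
--             for row in range(height):
--                 for col in range(1, width):
--                     leaves[row][col - 1] += leaves[row][col]
--                     leaves[row][col] = 0
--         elif wind == 'R':  # Right
--             for row in range(height):
--                 for col in range(width - 2, -1, -1):
--                     leaves[row][col + 1] += leaves[row][col]
--                     leaves[row][col] = 0
--
--     # Calculate the total remaining leaves
--     remaining = sum(sum(row) for row in leaves)
--     return remaining
-- ===== SOURCE B (Python) =====
-- def remaining_leaves_chatGPT(width: int, height: int, leaves: list, winds: str) -> int:
--     # Winds only move leaves between cells; the total is invariant, so just sum the grid.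
--     # (Unlike A, B does not mutate `leaves`; equivalence claimed is about the return value.)
--     return sum(map(sum, leaves))
-- ===== Notes on version B (the rewrite author's own statement) =====
-- stated objective: faster
-- what changed: B drops the wind simulation entirely: every wind step only moves leaves between cells, so the total is invariant and B just sums the initial grid once.
import Mathlib
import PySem

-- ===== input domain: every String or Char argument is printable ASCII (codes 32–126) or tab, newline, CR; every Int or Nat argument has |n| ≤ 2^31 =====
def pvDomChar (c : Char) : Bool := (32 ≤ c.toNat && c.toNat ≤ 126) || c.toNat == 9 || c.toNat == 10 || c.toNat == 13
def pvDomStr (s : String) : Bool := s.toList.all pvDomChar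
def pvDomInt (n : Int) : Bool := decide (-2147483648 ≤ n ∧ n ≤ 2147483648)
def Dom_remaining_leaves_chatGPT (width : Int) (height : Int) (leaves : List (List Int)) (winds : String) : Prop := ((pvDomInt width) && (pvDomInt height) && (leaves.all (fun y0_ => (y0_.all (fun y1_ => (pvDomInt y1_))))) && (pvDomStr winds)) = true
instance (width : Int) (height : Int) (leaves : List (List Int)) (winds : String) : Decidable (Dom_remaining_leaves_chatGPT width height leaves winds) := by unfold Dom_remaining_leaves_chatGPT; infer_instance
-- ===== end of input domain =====

-- B replaces A's full wind simulation by a single sum of the grid (the total is invariant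
-- under winds), an asymptotic speed-up; A mutates `leaves` in place and B does not, so the
-- equivalence proved here is about the return value only.

-- ===== PORT A =====
-- one elementary Python step 'leaves[dr][dc] += leaves[sr][sc]; leaves[sr][sc] = 0'
-- (List.modify/set leave the list unchanged on an out-of-range index; Pre_ keeps all
-- indices in range, exactly where the Python does not raise IndexError)
def pvStep (g : List (List Int)) (dr dc sr sc : Nat) : List (List Int) :=
  let v := (g.getD sr []).getD sc 0
  let g1 := g.modify dr (fun row => row.modify dc (· + v))
  g1.modify sr (fun row => row.set sc 0)

def pvWind (width : Int) (height : Int) (g : List (List Int)) (wind : Char) : List (List Int) :=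
  if wind = 'U' then
    (PySem.List.pyRange 0 width 1).foldl (fun g col =>
      (PySem.List.pyRange 1 height 1).foldl (fun g row =>
        pvStep g (row - 1).toNat col.toNat row.toNat col.toNat) g) g
  else if wind = 'D' then
    (PySem.List.pyRange 0 width 1).foldl (fun g col =>
      (PySem.List.pyRange (height - 2) (-1) (-1)).foldl (fun g row =>
        pvStep g (row + 1).toNat col.toNat row.toNat col.toNat) g) g
  else if wind = 'L' then
    (PySem.List.pyRange 0 height 1).foldl (fun g row =>
      (PySem.List.pyRange 1 width 1).foldl (fun g col =>
        pvStep g row.toNat (col - 1).toNat row.toNat col.toNat) g) g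
  else if wind = 'R' then
    (PySem.List.pyRange 0 height 1).foldl (fun g row =>
      (PySem.List.pyRange (width - 2) (-1) (-1)).foldl (fun g col =>
        pvStep g row.toNat (col + 1).toNat row.toNat col.toNat) g) g
  else g

def remaining_leaves_chatGPT (width : Int) (height : Int) (leaves : List (List Int)) (winds : String) : Int :=
  let g := winds.toList.foldl (pvWind width height) leaves
  (g.map (fun row => row.foldl (· + ·) 0)).foldl (· + ·) 0

-- ===== PORT B =====
def remaining_leaves_chatGPT_alt (width : Int) (height : Int) (leaves : List (List Int)) (winds : String) : Int :=
  (leaves.map (fun row => row.foldl (· + ·) 0)).foldl (· + ·) 0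

-- ===== PRECONDITION & SPEC =====
-- the grid reaches at least `height` rows, each of the first `height` rows at least `width` wide
def pvShaped (width height : Int) (g : List (List Int)) : Prop :=
  height ≤ (g.length : Int) ∧ ∀ row ∈ g.take height.toNat, width ≤ (row.length : Int)

-- Pre_ excludes exactly the inputs on which A raises IndexError: an effective vertical wind
-- ('U'/'D' with height ≥ 2, width ≥ 1) or horizontal wind ('L'/'R' with width ≥ 2, height ≥ 1)
-- touching a grid that is not at least height × width.
def Pre_remaining_leaves_chatGPT (width : Int) (height : Int) (leaves : List (List Int)) (winds : String) : Prop :=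
  ((('U' ∈ winds.toList ∨ 'D' ∈ winds.toList) ∧ 2 ≤ height ∧ 1 ≤ width) → pvShaped width height leaves) ∧
  ((('L' ∈ winds.toList ∨ 'R' ∈ winds.toList) ∧ 2 ≤ width ∧ 1 ≤ height) → pvShaped width height leaves)

instance (width : Int) (height : Int) (leaves : List (List Int)) (winds : String) : Decidable (Pre_remaining_leaves_chatGPT width height leaves winds) := by
  unfold Pre_remaining_leaves_chatGPT pvShaped; infer_instance

def pvWitness_remaining_leaves_chatGPT : Int × Int × List (List Int) × String :=
  (2, 2, [[1, 2], [3, 4]], "UDLR")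

def Spec_remaining_leaves_chatGPT (width : Int) (height : Int) (leaves : List (List Int)) (winds : String) (out : Int) : Prop := out = remaining_leaves_chatGPT_alt width height leaves winds
instance (width : Int) (height : Int) (leaves : List (List Int)) (winds : String) (out : Int) : Decidable (Spec_remaining_leaves_chatGPT width height leaves winds out) := by unfold Spec_remaining_leaves_chatGPT; infer_instance

-- ===== CLAIM (what is proved, stated in full; the proofs are below) =====
def Claim_equal_remaining_leaves_chatGPT : Prop := ∀ (width : Int) (height : Int) (leaves : List (List Int)) (winds : String), Dom_remaining_leaves_chatGPT width height leaves winds → Pre_remaining_leaves_chatGPT width height leaves winds → Spec_remaining_leaves_chatGPT width height leaves winds (remaining_leaves_chatGPT width height leaves winds)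


-- ===== LEMMAS AND PROOFS =====

-- total number of leaves in a grid
def pvGSum (g : List (List Int)) : Int := (g.map List.sum).sum

lemma pvGSum_eq (g : List (List Int)) :
    (g.map (fun row => row.foldl (· + ·) 0)).foldl (· + ·) 0 = pvGSum g := by
  simp only [pvGSum, ← List.sum_eq_foldl]

-- row-level facts
lemma sum_modify_add (l : List Int) (n : Nat) (v : Int) (h : n < l.length) :
    (l.modify n (· + v)).sum = l.sum + v := by
  induction l generalizing n with
  | nil => simp at h
  | cons a t ih =>
    cases n with
    | zero => simp [List.modify]; ring
    | succ m =>
      simp only [List.modify_succ_cons, List.sum_cons]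
      rw [ih m (by simpa using h)]; ring

lemma sum_set_zero (l : List Int) (n : Nat) (h : n < l.length) :
    (l.set n 0).sum = l.sum - l.getD n 0 := by
  induction l generalizing n with
  | nil => simp at h
  | cons a t ih =>
    cases n with
    | zero => simp
    | succ m =>
      simp only [List.set_cons_succ, List.sum_cons, List.getD_cons_succ]
      rw [ih m (by simpa using h)]; ring

lemma getD_modify_ne (l : List Int) (n m : Nat) (f : Int → Int) (hne : n ≠ m) :
    (l.modify n f).getD m 0 = l.getD m 0 := by
  induction l generalizing n m with
  | nil => simp
  | cons a t ih =>
    cases n with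
    | zero =>
      cases m with
      | zero => exact absurd rfl hne
      | succ k => simp [List.modify]
    | succ j =>
      cases m with
      | zero => simp [List.modify]
      | succ k =>
        simp only [List.modify_succ_cons, List.getD_cons_succ]
        exact ih j k (by omega)

-- grid-level facts about modify
lemma getD_grid_modify_ne (g : List (List Int)) (n m : Nat) (f : List Int → List Int) (hne : n ≠ m) :
    (g.modify n f).getD m [] = g.getD m [] := by
  induction g generalizing n m with
  | nil => simp
  | cons a t ih =>
    cases n with
    | zero =>
      cases m with
      | zero => exact absurd rfl hne
      | succ k => simp [List.modify]
    | succ j =>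
      cases m with
      | zero => simp [List.modify]
      | succ k =>
        simp only [List.modify_succ_cons, List.getD_cons_succ]
        exact ih j k (by omega)

lemma getD_grid_modify_self (g : List (List Int)) (n : Nat) (f : List Int → List Int) (h : n < g.length) :
    (g.modify n f).getD n [] = f (g.getD n []) := by
  induction g generalizing n with
  | nil => simp at h
  | cons a t ih =>
    cases n with
    | zero => simp [List.modify]
    | succ m =>
      simp only [List.modify_succ_cons, List.getD_cons_succ]
      exact ih m (by simpa using h)

lemma pvGSum_modify (g : List (List Int)) (n : Nat) (f : List Int → List Int) (h : n < g.length) :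
    pvGSum (g.modify n f) = pvGSum g - (g.getD n []).sum + (f (g.getD n [])).sum := by
  induction g generalizing n with
  | nil => simp at h
  | cons a t ih =>
    cases n with
    | zero => simp [List.modify, pvGSum]; ring
    | succ m =>
      simp only [List.modify_succ_cons, pvGSum, List.map_cons, List.sum_cons, List.getD_cons_succ]
      have := ih m (by simpa using h)
      simp only [pvGSum] at this
      rw [this]; ring

-- the row-length profile, the shape invariant of the whole simulation
lemma lengths_modify (g : List (List Int)) (n : Nat) (f : List Int → List Int)
    (hf : ∀ r, (f r).length = r.length) :
    (g.modify n f).map List.length = g.map List.length := by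
  induction g generalizing n with
  | nil => simp
  | cons a t ih =>
    cases n with
    | zero => simp [List.modify, hf]
    | succ m => simp only [List.modify_succ_cons, List.map_cons]; rw [ih m]

lemma lengths_pvStep (g : List (List Int)) (dr dc sr sc : Nat) :
    (pvStep g dr dc sr sc).map List.length = g.map List.length := by
  unfold pvStep
  rw [lengths_modify _ _ _ (fun r => List.length_set ..),
      lengths_modify _ _ _ (fun r => List.length_modify ..)]

-- pvStep preserves the total when all four indices are in range and the cells differ
lemma pvGSum_pvStep (g : List (List Int)) (dr dc sr sc : Nat)
    (hdr : dr < g.length) (hsr : sr < g.length)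
    (hdc : dc < (g.getD dr []).length) (hsc : sc < (g.getD sr []).length)
    (hne : (dr, dc) ≠ (sr, sc)) :
    pvGSum (pvStep g dr dc sr sc) = pvGSum g := by
  unfold pvStep
  set v := (g.getD sr []).getD sc 0 with hv
  set g1 := g.modify dr (fun row => row.modify dc (· + v)) with hg1
  have hlen1 : g1.length = g.length := by simp [hg1]
  have hsum1 : pvGSum g1 = pvGSum g + v := by
    rw [hg1, pvGSum_modify g dr _ hdr, sum_modify_add _ _ _ hdc]; ring
  have hrow : (g1.getD sr []) = (g.getD sr []) ∨
      (dr = sr ∧ g1.getD sr [] = (g.getD sr []).modify dc (· + v)) := by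
    by_cases hEq : dr = sr
    · right; exact ⟨hEq, by rw [hg1, hEq, getD_grid_modify_self _ _ _ hsr]⟩
    · left; rw [hg1, getD_grid_modify_ne _ _ _ _ hEq]
  have hsclen : sc < (g1.getD sr []).length := by
    rcases hrow with h | ⟨_, h⟩
    · rw [h]; exact hsc
    · rw [h, List.length_modify]; exact hsc
  have hval : (g1.getD sr []).getD sc 0 = v := by
    rcases hrow with h | ⟨hEq, h⟩
    · rw [h]
    · have hdcsc : dc ≠ sc := by
        intro hcc; exact hne (by rw [hEq, hcc])
      rw [h, getD_modify_ne _ _ _ _ hdcsc]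
  rw [pvGSum_modify g1 sr _ (by omega), sum_set_zero _ _ hsclen]
  have : (g1.getD sr []).sum - ((g1.getD sr []).getD sc 0) = (g1.getD sr []).sum - v := by rw [hval]
  rw [hsum1]
  omega

-- generic preservation along a foldl
lemma foldl_preserve {α : Type} (l : List α) (F : List (List Int) → α → List (List Int))
    (P : List (List Int) → Prop)
    (h : ∀ g x, x ∈ l → P g → P (F g x) ∧ pvGSum (F g x) = pvGSum g) :
    ∀ g, P g → P (l.foldl F g) ∧ pvGSum (l.foldl F g) = pvGSum g := by
  induction l with
  | nil => intro g hg; exact ⟨hg, rfl⟩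
  | cons a t ih =>
    intro g hg
    have h1 := h g a (by simp) hg
    have h2 := ih (fun g x hx hg => h g x (by simp [hx]) hg) (F g a) h1.1
    exact ⟨h2.1, by rw [List.foldl_cons, h2.2, h1.2]⟩

-- shape read off the (invariant) length profile
def pvShapedN (w h : Nat) (g : List (List Int)) : Prop :=
  h ≤ g.length ∧ ∀ i < h, w ≤ (g.getD i []).length

lemma shapedN_of_lengths {w h : Nat} {g g' : List (List Int)}
    (hl : g'.map List.length = g.map List.length) (hs : pvShapedN w h g) : pvShapedN w h g' := by
  have hlen : g'.length = g.length := by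
    have := congrArg List.length hl; simpa using this
  have hh := hs.1
  refine ⟨by omega, fun i hi => ?_⟩
  have hig : i < g.length := by omega
  have hig' : i < g'.length := by omega
  have : (g'.getD i []).length = (g.getD i []).length := by
    have h1 : (g'.map List.length).getD i 0 = (g.map List.length).getD i 0 := by rw [hl]
    rwa [List.getD_eq_getElem _ _ (by simpa using hig'), List.getD_eq_getElem _ _ (by simpa using hig),
        List.getElem_map, List.getElem_map, ← List.getD_eq_getElem g' _ hig', ← List.getD_eq_getElem g _ hig] at h1
  rw [this]; exact hs.2 i hi

lemma shapedN_of_shaped {width height : Int} {g : List (List Int)}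
    (hw : 0 ≤ width) (hs : pvShaped width height g) : pvShapedN width.toNat height.toNat g := by
  obtain ⟨h1, h2⟩ := hs
  refine ⟨by omega, fun i hi => ?_⟩
  have hig : i < g.length := by omega
  have hmem : g.getD i [] ∈ g.take height.toNat := by
    rw [List.getD_eq_getElem g _ hig]
    have : g[i] = (g.take height.toNat)[i]'(by simp; omega) := (List.getElem_take ..).symm
    rw [this]; exact List.getElem_mem _
  have := h2 _ hmem
  omega

-- one pvStep inside a shaped region preserves shape profile and total
lemma step_ok {w h : Nat} (g : List (List Int)) (dr dc sr sc : Nat)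
    (hg : pvShapedN w h g)
    (hdr : dr < h) (hdc : dc < w) (hsr : sr < h) (hsc : sc < w)
    (hne : (dr, dc) ≠ (sr, sc)) :
    (pvStep g dr dc sr sc).map List.length = g.map List.length ∧
    pvGSum (pvStep g dr dc sr sc) = pvGSum g := by
  refine ⟨lengths_pvStep .., pvGSum_pvStep g dr dc sr sc ?_ ?_ ?_ ?_ hne⟩
  · exact lt_of_lt_of_le hdr hg.1
  · exact lt_of_lt_of_le hsr hg.1
  · exact lt_of_lt_of_le hdc (hg.2 dr hdr)
  · exact lt_of_lt_of_le hsc (hg.2 sr hsr)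

lemma foldl_const {α β : Type} (l : List α) (init : β) :
    l.foldl (fun g _ => g) init = init := by
  induction l generalizing init with
  | nil => rfl
  | cons a t ih => exact ih init

lemma double_fold_ok {w h : Nat} (outer inner : List Int)
    (d s : Int → Int → Nat × Nat)
    (hb : ∀ x ∈ outer, ∀ y ∈ inner,
      (d x y).1 < h ∧ (d x y).2 < w ∧ (s x y).1 < h ∧ (s x y).2 < w ∧ d x y ≠ s x y)
    (L0 : List (List Int)) (hs : pvShapedN w h L0)
    (g : List (List Int)) (hg : g.map List.length = L0.map List.length) :
    (outer.foldl (fun g x => inner.foldl (fun g y =>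
        pvStep g (d x y).1 (d x y).2 (s x y).1 (s x y).2) g) g).map List.length
        = L0.map List.length ∧
    pvGSum (outer.foldl (fun g x => inner.foldl (fun g y =>
        pvStep g (d x y).1 (d x y).2 (s x y).1 (s x y).2) g) g) = pvGSum g := by
  refine foldl_preserve outer _ (fun g' => g'.map List.length = L0.map List.length) ?_ g hg
  intro g' x hx hg'
  refine foldl_preserve inner _ (fun g'' => g''.map List.length = L0.map List.length) ?_ g' hg'
  intro g'' y hy hg''
  obtain ⟨h1, h2, h3, h4, h5⟩ := hb x hx y hy
  have hsh : pvShapedN w h g'' := shapedN_of_lengths hg'' hs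
  have hne : ((d x y).1, (d x y).2) ≠ ((s x y).1, (s x y).2) := by
    simpa using h5
  have := step_ok g'' (d x y).1 (d x y).2 (s x y).1 (s x y).2 hsh h1 h2 h3 h4 hne
  exact ⟨this.1.trans hg'', this.2⟩

theorem remaining_leaves_chatGPT_spec : Claim_equal_remaining_leaves_chatGPT := by
  intro width height leaves winds _ hPre
  unfold Spec_remaining_leaves_chatGPT remaining_leaves_chatGPT remaining_leaves_chatGPT_alt pvWind
  rw [pvGSum_eq, pvGSum_eq]
  refine (foldl_preserve winds.toList _
    (fun g => g.map List.length = leaves.map List.length) ?_ leaves rfl).2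
  intro g c hc hg
  by_cases hU : c = 'U'
  · subst hU; rw [if_pos rfl]
    by_cases hw1 : 1 ≤ width
    · by_cases hh2 : 2 ≤ height
      · have hsN := shapedN_of_shaped (by omega) (hPre.1 ⟨Or.inl hc, hh2, hw1⟩)
        have hb : ∀ x ∈ PySem.List.pyRange 0 width 1, ∀ y ∈ PySem.List.pyRange 1 height 1,
              (y - 1).toNat < height.toNat ∧ x.toNat < width.toNat ∧
              y.toNat < height.toNat ∧ x.toNat < width.toNat ∧
              ((y - 1).toNat, x.toNat) ≠ (y.toNat, x.toNat) := by
            intro x hx y hy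
            rw [PySem.List.mem_pyRange_one] at hx
            rw [PySem.List.mem_pyRange_one] at hy
            refine ⟨by omega, by omega, by omega, by omega, fun hEq => ?_⟩
            have := congrArg Prod.fst hEq; simp at this; omega
        exact double_fold_ok (PySem.List.pyRange 0 width 1) (PySem.List.pyRange 1 height 1)
          (fun col row => ((row - 1).toNat, col.toNat)) (fun col row => (row.toNat, col.toNat))
          hb leaves hsN g hg
      · rw [PySem.List.pyRange_one_eq_nil (a := 1) (b := height) (by omega)]
        simp only [List.foldl_nil, foldl_const]
        exact ⟨hg, trivial⟩
    · rw [PySem.List.pyRange_one_eq_nil (a := 0) (b := width) (by omega)]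
      exact ⟨hg, rfl⟩
  · by_cases hD : c = 'D'
    · subst hD; rw [if_neg hU, if_pos rfl]
      by_cases hw1 : 1 ≤ width
      · by_cases hh2 : 2 ≤ height
        · have hsN := shapedN_of_shaped (by omega) (hPre.1 ⟨Or.inr hc, hh2, hw1⟩)
          have hb : ∀ x ∈ PySem.List.pyRange 0 width 1, ∀ y ∈ PySem.List.pyRange (height - 2) (-1) (-1),
              (y + 1).toNat < height.toNat ∧ x.toNat < width.toNat ∧
              y.toNat < height.toNat ∧ x.toNat < width.toNat ∧
              ((y + 1).toNat, x.toNat) ≠ (y.toNat, x.toNat) := by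
            intro x hx y hy
            rw [PySem.List.mem_pyRange_one] at hx
            rw [PySem.List.mem_pyRange_neg_one] at hy
            refine ⟨by omega, by omega, by omega, by omega, fun hEq => ?_⟩
            have := congrArg Prod.fst hEq; simp at this; omega
          exact double_fold_ok (PySem.List.pyRange 0 width 1) (PySem.List.pyRange (height - 2) (-1) (-1))
            (fun col row => ((row + 1).toNat, col.toNat)) (fun col row => (row.toNat, col.toNat))
            hb leaves hsN g hg
        · rw [PySem.List.pyRange_neg_one_eq_nil (a := height - 2) (b := -1) (by omega)]
          simp only [List.foldl_nil, foldl_const]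
          exact ⟨hg, trivial⟩
      · rw [PySem.List.pyRange_one_eq_nil (a := 0) (b := width) (by omega)]
        exact ⟨hg, rfl⟩
    · by_cases hL : c = 'L'
      · subst hL; rw [if_neg hU, if_neg hD, if_pos rfl]
        by_cases hh1 : 1 ≤ height
        · by_cases hw2 : 2 ≤ width
          · have hsN := shapedN_of_shaped (by omega) (hPre.2 ⟨Or.inl hc, hw2, hh1⟩)
            have hb : ∀ x ∈ PySem.List.pyRange 0 height 1, ∀ y ∈ PySem.List.pyRange 1 width 1,
                x.toNat < height.toNat ∧ (y - 1).toNat < width.toNat ∧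
                x.toNat < height.toNat ∧ y.toNat < width.toNat ∧
                (x.toNat, (y - 1).toNat) ≠ (x.toNat, y.toNat) := by
              intro x hx y hy
              rw [PySem.List.mem_pyRange_one] at hx
              rw [PySem.List.mem_pyRange_one] at hy
              refine ⟨by omega, by omega, by omega, by omega, fun hEq => ?_⟩
              have := congrArg Prod.snd hEq; simp at this; omega
            exact double_fold_ok (PySem.List.pyRange 0 height 1) (PySem.List.pyRange 1 width 1)
              (fun row col => (row.toNat, (col - 1).toNat)) (fun row col => (row.toNat, col.toNat))
              hb leaves hsN g hg
          · rw [PySem.List.pyRange_one_eq_nil (a := 1) (b := width) (by omega)]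
            simp only [List.foldl_nil, foldl_const]
            exact ⟨hg, trivial⟩
        · rw [PySem.List.pyRange_one_eq_nil (a := 0) (b := height) (by omega)]
          exact ⟨hg, rfl⟩
      · by_cases hR : c = 'R'
        · subst hR; rw [if_neg hU, if_neg hD, if_neg hL, if_pos rfl]
          by_cases hh1 : 1 ≤ height
          · by_cases hw2 : 2 ≤ width
            · have hsN := shapedN_of_shaped (by omega) (hPre.2 ⟨Or.inr hc, hw2, hh1⟩)
              have hb : ∀ x ∈ PySem.List.pyRange 0 height 1, ∀ y ∈ PySem.List.pyRange (width - 2) (-1) (-1),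
                  x.toNat < height.toNat ∧ (y + 1).toNat < width.toNat ∧
                  x.toNat < height.toNat ∧ y.toNat < width.toNat ∧
                  (x.toNat, (y + 1).toNat) ≠ (x.toNat, y.toNat) := by
                intro x hx y hy
                rw [PySem.List.mem_pyRange_one] at hx
                rw [PySem.List.mem_pyRange_neg_one] at hy
                refine ⟨by omega, by omega, by omega, by omega, fun hEq => ?_⟩
                have := congrArg Prod.snd hEq; simp at this; omega
              exact double_fold_ok (PySem.List.pyRange 0 height 1) (PySem.List.pyRange (width - 2) (-1) (-1))
                (fun row col => (row.toNat, (col + 1).toNat)) (fun row col => (row.toNat, col.toNat))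
                hb leaves hsN g hg
            · rw [PySem.List.pyRange_neg_one_eq_nil (a := width - 2) (b := -1) (by omega)]
              simp only [List.foldl_nil, foldl_const]
              exact ⟨hg, trivial⟩
          · rw [PySem.List.pyRange_one_eq_nil (a := 0) (b := height) (by omega)]
            exact ⟨hg, rfl⟩
        · rw [if_neg hU, if_neg hD, if_neg hL, if_neg hR]
          exact ⟨hg, rfl⟩
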